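-- pv_equiv track=rewrite | github.com/Vidalb1/pytzee | pytzee.py | pytzee
-- ===== SOURCE A (Python) =====
-- def pytzee(rolled_list):
--     """    A function to check if there's a pytzee in the rolled_list
--             :param rolled_list: A list of 5 dice rolls between the numbers 1 through 6.
--             :return: Awarded 50 points if all of the five dice are the same.
--     """
--     points = 0
--     counter = 1
--     for i in range(len(rolled_list) - 1):
--         if(rolled_list[i] == rolled_list[i+1]):
--             counter += 1
--     if(counter == len(rolled_list)):
--         points += 50
--     return points
-- ===== SOURCE B (Python) =====
-- def pytzee(rolled_list):
--     return 50 if rolled_list and len(set(rolled_list)) == 1 else 0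
-- ===== Notes on version B (the rewrite author's own statement) =====
-- stated objective: simpler
-- what changed: Replaces the index loop that counts adjacent equal pairs (and compares the counter to the length) with a single distinct-value test: non-empty and exactly one distinct value awards 50.
import Mathlib
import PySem

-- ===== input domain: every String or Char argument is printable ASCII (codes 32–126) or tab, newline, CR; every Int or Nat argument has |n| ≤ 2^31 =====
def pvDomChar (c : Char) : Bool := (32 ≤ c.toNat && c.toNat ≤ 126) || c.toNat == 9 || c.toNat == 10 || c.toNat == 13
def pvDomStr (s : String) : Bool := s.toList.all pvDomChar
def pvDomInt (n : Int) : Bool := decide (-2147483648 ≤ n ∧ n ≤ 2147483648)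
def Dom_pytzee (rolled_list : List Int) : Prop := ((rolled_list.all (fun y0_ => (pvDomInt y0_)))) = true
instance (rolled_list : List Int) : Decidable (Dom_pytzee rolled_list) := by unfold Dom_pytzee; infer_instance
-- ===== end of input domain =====

-- B replaces A's adjacent-pair counter loop by a distinct-value test (set size 1 on a non-empty list); objective: simpler.


-- ===== PORT A =====
-- rolled_list[i] / rolled_list[i+1] always have 0 ≤ index < len inside the range, so pyGetD is exact here
def pytzee (rolled_list : List Int) : Int :=
  let points : Int := 0
  let counter : Int :=
    (PySem.List.pyRange 0 ((rolled_list.length : Int) - 1) 1).foldl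
      (fun c i =>
        if PySem.List.pyGetD rolled_list i 0 = PySem.List.pyGetD rolled_list (i + 1) 0 then c + 1
        else c) 1
  if counter = (rolled_list.length : Int) then points + 50 else points

-- ===== PORT B =====
def pytzee_alt (rolled_list : List Int) : Int :=
  if rolled_list ≠ [] ∧ PySem.Set.len (PySem.Set.ofList rolled_list) = 1 then 50 else 0

-- ===== PRECONDITION & SPEC =====
def Spec_pytzee (rolled_list : List Int) (out : Int) : Prop := out = pytzee_alt rolled_list
instance (rolled_list : List Int) (out : Int) : Decidable (Spec_pytzee rolled_list out) := by unfold Spec_pytzee; infer_instance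

-- ===== CLAIM (what is proved, stated in full; the proofs are below) =====
def Claim_equal_pytzee : Prop := ∀ (rolled_list : List Int), Dom_pytzee rolled_list → Spec_pytzee rolled_list (pytzee rolled_list)

-- ===== LEMMAS AND PROOFS =====

-- all adjacent pairs equal ↔ all elements equal the head
lemma zip_pairs_eq_iff (a : Int) (t : List Int) :
    (∀ p ∈ (a :: t).zip t, p.1 = p.2) ↔ (∀ x ∈ a :: t, x = a) := by
  induction t generalizing a with
  | nil => simp
  | cons b t ih =>
    constructor
    · rintro h x hx
      have hab : a = b := h (a, b) (by simp)
      have hrest := (ih b).mp (fun p hp => h p (by simp [hp]))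
      rcases List.mem_cons.mp hx with rfl | hx
      · rfl
      · exact (hrest x hx).trans hab.symm
    · rintro h p hp
      have hab : b = a := h b (by simp)
      rcases List.mem_cons.mp hp with rfl | hp
      · simpa using hab.symm
      · exact (ih b).mpr (fun x hx => (h x (List.mem_cons_of_mem _ hx)).trans hab.symm) p hp

lemma set_len_one_iff (a : Int) (t : List Int) :
    PySem.Set.len (PySem.Set.ofList (a :: t)) = 1 ↔ ∀ x ∈ a :: t, x = a := by
  have hmem : ∀ x : Int, x ∈ PySem.Set.ofList (a :: t) ↔ x ∈ a :: t :=
    fun x => PySem.Set.mem_ofList (a :: t) x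
  have hnd : (PySem.Set.ofList (a :: t) : List Int).Nodup := PySem.Set.nodup_ofList (a :: t)
  constructor
  · intro h x hx
    have hlen : (PySem.Set.ofList (a :: t) : List Int).length = 1 := by
      simpa [PySem.Set.len] using h
    obtain ⟨y, hy⟩ := List.length_eq_one_iff.mp hlen
    have hxy : x = y := by have := (hmem x).mpr hx; simpa [hy] using this
    have hay : a = y := by have := (hmem a).mpr (by simp); simpa [hy] using this
    rw [hxy, hay]
  · intro h
    have hsub : ∀ x ∈ PySem.Set.ofList (a :: t), x = a := fun x hx => h x ((hmem x).mp hx)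
    have hane : a ∈ PySem.Set.ofList (a :: t) := (hmem a).mpr (by simp)
    rcases hs : (PySem.Set.ofList (a :: t) : List Int) with _ | ⟨b, rest⟩
    · rw [hs] at hane; simp at hane
    · have hb : b = a := hsub b (by rw [hs]; simp)
      have hrest : rest = [] := by
        rcases rest with _ | ⟨c, r⟩
        · rfl
        · have hc : c = a := hsub c (by rw [hs]; simp)
          rw [hs] at hnd
          simp [hb, hc] at hnd
      simp [PySem.Set.len, hrest]

theorem pytzee_eq (l : List Int) : pytzee l = pytzee_alt l := by
  cases l with
  | nil => decide
  | cons a t =>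
    unfold pytzee pytzee_alt
    have hlen : ((a :: t).length : Int) - 1 = (((a :: t).zip t).length : Int) := by
      simp
    -- rewrite the indexed fold into a fold over the list of adjacent pairs
    have hcongr :
        (PySem.List.pyRange 0 (((a :: t).length : Int) - 1) 1).foldl
          (fun c i =>
            if PySem.List.pyGetD (a :: t) i 0 = PySem.List.pyGetD (a :: t) (i + 1) 0 then c + 1
            else c) (1 : Int)
        = ((a :: t).zip t).foldl (fun c p => if p.1 = p.2 then c + 1 else c) (1 : Int) := by
      rw [hlen]
      have hstep :
          (PySem.List.pyRange 0 ((((a :: t).zip t).length : Int)) 1).foldl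
            (fun c i =>
              if PySem.List.pyGetD (a :: t) i 0 = PySem.List.pyGetD (a :: t) (i + 1) 0 then c + 1
              else c) (1 : Int)
          = (PySem.List.pyRange 0 ((((a :: t).zip t).length : Int)) 1).foldl
            (fun c i =>
              if (PySem.List.pyGetD ((a :: t).zip t) i (0, 0)).1
                 = (PySem.List.pyGetD ((a :: t).zip t) i (0, 0)).2 then c + 1
              else c) (1 : Int) := by
        apply PySem.List.foldl_congr_mem
        intro acc i hi
        have hi' := PySem.List.mem_pyRange_one.mp hi
        have h0 : 0 ≤ i := hi'.1
        have hlt : i.toNat < ((a :: t).zip t).length := by omega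
        have hlt' : i.toNat < t.length := by
          simpa [Nat.min_def] using hlt
        have e1 : PySem.List.pyGetD (a :: t) i 0 = (a :: t)[i.toNat] := by
          rw [PySem.List.pyGetD_eq_getElem]
          · omega
          · simp; omega
        have e2 : PySem.List.pyGetD (a :: t) (i + 1) 0 = t[i.toNat] := by
          rw [PySem.List.pyGetD_eq_getElem]
          · have : (i + 1).toNat = i.toNat + 1 := by omega
            simp [this]
          · omega
          · simp; omega
        have e3 : PySem.List.pyGetD ((a :: t).zip t) i (0, 0) = ((a :: t)[i.toNat], t[i.toNat]) := by
          rw [PySem.List.pyGetD_eq_getElem]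
          · exact List.getElem_zip
          · omega
          · omega
        rw [e1, e2, e3]
      rw [hstep, PySem.List.foldl_pyRange_zero_pyGetD' ((a :: t).zip t) ((0 : Int), (0 : Int)) (fun c p => if p.1 = p.2 then c + 1 else c) 1]
    have hcount2 :
        (PySem.List.pyRange 0 (((a :: t).length : Int) - 1) 1).foldl
          (fun c i =>
            if PySem.List.pyGetD (a :: t) i 0 = PySem.List.pyGetD (a :: t) (i + 1) 0 then c + 1
            else c) (1 : Int)
        = 1 + ((((a :: t).zip t).countP (fun p => decide (p.1 = p.2)) : Nat) : Int) := by
      exact hcongr.trans (PySem.List.foldl_ite_add_one (fun p : Int × Int => p.1 = p.2) ((a :: t).zip t) 1)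
    simp only [hcount2]
    have hziplen : ((a :: t).zip t).length = t.length := by simp
    by_cases hall : ∀ x ∈ a :: t, x = a
    · have hpairs : ∀ p ∈ (a :: t).zip t, p.1 = p.2 := (zip_pairs_eq_iff a t).mpr hall
      have hc : ((a :: t).zip t).countP (fun p => decide (p.1 = p.2)) = t.length := by
        rw [List.countP_eq_length.mpr (by intro p hp; simpa using hpairs p hp), hziplen]
      have hset : PySem.Set.len (PySem.Set.ofList (a :: t)) = 1 := (set_len_one_iff a t).mpr hall
      rw [if_pos (by rw [hc]; push_cast [List.length_cons]; ring), if_pos ⟨by simp, hset⟩]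
      norm_num
    · have hpairs : ¬ ∀ p ∈ (a :: t).zip t, p.1 = p.2 := fun h => hall ((zip_pairs_eq_iff a t).mp h)
      have hc : ((a :: t).zip t).countP (fun p => decide (p.1 = p.2)) ≠ t.length := by
        intro h
        exact hpairs (by
          intro p hp
          have := List.countP_eq_length.mp (by rw [h, hziplen]) p hp
          simpa using this)
      have hset : PySem.Set.len (PySem.Set.ofList (a :: t)) ≠ 1 :=
        fun h => hall ((set_len_one_iff a t).mp h)
      rw [if_neg (by simp; omega), if_neg (by rintro ⟨-, h⟩; exact hset h)]

-- ===== VERDICT (by name: the statement is the Claim_ definition above) =====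
theorem pytzee_spec : Claim_equal_pytzee := by
  intro l _
  exact pytzee_eq l
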